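-- pv_equiv track=rewrite | github.com/MissionWAR/Merge-Blocklists | scripts/utils.py | has_parent_domain
-- ===== SOURCE A (Python) =====
-- def has_parent_domain(domain: str, domain_set: set[str]) -> bool:
--     """
--     Return True if any parent of `domain` exists in domain_set.
--
--     Example:
--         has_parent_domain("a.b.c", {"b.c"}) -> True
--     """
--     if not domain or not domain_set:
--         return False
--     parts = domain.split(".")
--     for i in range(1, len(parts)):
--         if ".".join(parts[i:]) in domain_set:
--             return True
--     return False
-- ===== SOURCE B (Python) =====
-- def has_parent_domain(domain: str, domain_set: set[str]) -> bool:
--     """Build each parent suffix incrementally from the rightmost label,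
--     checking membership as the suffix grows (right-to-left accumulator)."""
--     if not domain or not domain_set:
--         return False
--     labels = domain.split(".")
--     suffix = None
--     for label in reversed(labels[1:]):
--         suffix = label if suffix is None else label + "." + suffix
--         if suffix in domain_set:
--             return True
--     return False
-- ===== Notes on version B (the rewrite author's own statement) =====
-- stated objective: alternative
-- what changed: B builds each parent suffix incrementally from the rightmost label (right-to-left accumulator: suffix = label + '.' + suffix, checked at each step) instead of A's left-to-right loop that re-joins parts[i:] from scratch for every index.
import Mathlib
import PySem

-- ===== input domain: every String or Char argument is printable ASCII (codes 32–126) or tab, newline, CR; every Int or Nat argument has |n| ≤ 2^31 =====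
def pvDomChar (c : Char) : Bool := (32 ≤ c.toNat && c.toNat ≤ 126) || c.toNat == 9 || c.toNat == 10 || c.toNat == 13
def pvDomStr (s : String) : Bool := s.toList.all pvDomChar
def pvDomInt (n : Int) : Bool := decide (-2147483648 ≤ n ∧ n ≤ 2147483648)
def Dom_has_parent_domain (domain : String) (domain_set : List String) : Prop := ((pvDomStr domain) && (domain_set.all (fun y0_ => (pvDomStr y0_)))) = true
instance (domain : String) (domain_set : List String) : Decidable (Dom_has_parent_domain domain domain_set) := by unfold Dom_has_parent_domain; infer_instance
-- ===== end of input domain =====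

-- B builds each parent suffix incrementally from the rightmost label (right-to-left
-- accumulator) instead of A's left-to-right loop that re-joins parts[i:] for every index.

-- ===== PORT A =====
-- 'for i in range(1, len(parts)): if ".".join(parts[i:]) in domain_set: return True'
def aLoop (domain_set : List String) (parts : List String) : List Int → Bool
  | [] => false
  | i :: rest =>
    if domain_set.contains (PySem.Str.join "." (PySem.List.slice parts (some i) none)) then true
    else aLoop domain_set parts rest

def has_parent_domain (domain : String) (domain_set : List String) : Bool :=
  if domain = "" || domain_set = [] then false
  else
    match PySem.Str.split? domain "." with
    | none => false   -- unreachable: the separator "." is non-empty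
    | some parts => aLoop domain_set parts (PySem.List.pyRange 1 parts.length 1)

-- ===== PORT B =====
-- 'for label in reversed(labels[1:]): suffix = label if suffix is None else label + "." + suffix;
--  if suffix in domain_set: return True' — suffix : Option String is the accumulator.
def bLoop (domain_set : List String) : List String → Option String → Bool
  | [], _ => false
  | label :: rest, suf =>
    let suffix := match suf with | none => label | some t => label ++ "." ++ t
    if domain_set.contains suffix then true else bLoop domain_set rest (some suffix)

def has_parent_domain_alt (domain : String) (domain_set : List String) : Bool :=
  if domain = "" || domain_set = [] then false
  else
    match PySem.Str.split? domain "." with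
    | none => false   -- unreachable: the separator "." is non-empty
    | some labels => bLoop domain_set (PySem.List.slice labels (some 1) none).reverse none

-- ===== PRECONDITION & SPEC =====
def Spec_has_parent_domain (domain : String) (domain_set : List String) (out : Bool) : Prop := out = has_parent_domain_alt domain domain_set
instance (domain : String) (domain_set : List String) (out : Bool) : Decidable (Spec_has_parent_domain domain domain_set out) := by unfold Spec_has_parent_domain; infer_instance

-- ===== CLAIM (what is proved, stated in full; the proofs are below) =====
def Claim_equal_has_parent_domain : Prop := ∀ (domain : String) (domain_set : List String), Dom_has_parent_domain domain domain_set → Spec_has_parent_domain domain domain_set (has_parent_domain domain domain_set)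

-- ===== LEMMAS AND PROOFS =====

-- generic spec of "check every nonempty suffix's value"
def specG (q : List α → Bool) : List α → Bool
  | [] => false
  | h :: t => q (h :: t) || specG q t

theorem specG_congr {α : Type} {q q' : List α → Bool} (h : ∀ l, q l = q' l) :
    ∀ l, specG q l = specG q' l := by
  intro l; induction l with
  | nil => rfl
  | cons a t ih => simp [specG, h, ih]

theorem specG_append_singleton {α : Type} (q : List α → Bool) (a : α) :
    ∀ t : List α, specG q (t ++ [a]) = (q [a] || specG (fun ps => q (ps ++ [a])) t) := by
  intro t; induction t with
  | nil => simp [specG]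
  | cons b r ih =>
    show specG q ((b :: r) ++ [a]) = _
    rw [List.cons_append, show specG q (b :: (r ++ [a]))
        = (q (b :: (r ++ [a])) || specG q (r ++ [a])) from rfl, ih]
    simp [specG, Bool.or_left_comm]

theorem any_range_drop {α : Type} (q : List α → Bool) (xs : List α) :
    (List.range xs.length).any (fun k => q (xs.drop k)) = specG q xs := by
  induction xs with
  | nil => simp [specG]
  | cons h t ih =>
    rw [show (h :: t).length = t.length + 1 from rfl, List.range_succ_eq_map]
    simp only [List.any_cons, List.any_map]
    rw [show ((fun k => q ((h :: t).drop k)) ∘ Nat.succ) = fun k => q (t.drop k) by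
      funext k; simp]
    rw [ih]
    simp [specG]

theorem aLoop_any (s parts : List String) (idxs : List Int) :
    aLoop s parts idxs
      = idxs.any (fun i => s.contains (PySem.Str.join "." (PySem.List.slice parts (some i) none))) := by
  induction idxs with
  | nil => rfl
  | cons i rest ih => simp [aLoop, ih]

theorem pyRange_one_nat (n : Nat) :
    PySem.List.pyRange 1 (n : Int) 1 = (List.range (n - 1)).map (fun k : Nat => 1 + (k : Int)) := by
  unfold PySem.List.pyRange
  by_cases h : (1 : Int) < (n : Int)
  · have h2 : ((n : Int) - 1 + 1 - 1) / 1 = ((n : Int) - 1) := by omega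
    have h3 : ((n : Int) - 1).toNat = n - 1 := by omega
    simp only [if_neg (by norm_num : ¬ (1 : Int) = 0), if_pos (by norm_num : (0:Int) < 1), if_pos h,
      h2, h3, one_mul]
  · have h0 : n - 1 = 0 := by omega
    simp [h, h0]

-- the A-side loop over range(1, len(parts)) checks every nonempty suffix of the tail
theorem aLoop_eq_specG (s : List String) (parts : List String) :
    aLoop s parts (PySem.List.pyRange 1 (parts.length : Int) 1)
      = match parts with
        | [] => false
        | _ :: t => specG (fun ps => s.contains (PySem.Str.join "." ps)) t := by
  rw [aLoop_any, pyRange_one_nat]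
  cases parts with
  | nil => simp
  | cons p t =>
    have hslice : ∀ k : Nat,
        PySem.List.slice (p :: t) (some (1 + (k : Int))) none = t.drop k := by
      intro k
      rw [PySem.List.slice_from (p :: t) (by omega : (0:Int) ≤ 1 + (k : Int))]
      have h4 : (1 + (k : Int)).toNat = k + 1 := by omega
      rw [h4]
      rfl
    simp only [List.any_map, Function.comp_def, hslice]
    simp only [List.length_cons, Nat.add_sub_cancel]
    exact any_range_drop (fun ps => s.contains (PySem.Str.join "." ps)) t

-- String-level join lemmas, lifted from PySem.Chars
theorem strjoin_singleton (a : String) : PySem.Str.join "." [a] = a := by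
  have h : (PySem.Str.join "." [a]).toList = a.toList := by
    rw [PySem.Str.toList_join]
    simpa using PySem.Chars.join_singleton (sep := (".").toList) (cs := a.toList)
  calc PySem.Str.join "." [a] = String.ofList (PySem.Str.join "." [a]).toList := by
        rw [String.ofList_toList]
    _ = a := by rw [h, String.ofList_toList]

theorem strjoin_cons (a b : String) (t : List String) :
    PySem.Str.join "." (a :: b :: t) = a ++ "." ++ PySem.Str.join "." (b :: t) := by
  have h : (PySem.Str.join "." (a :: b :: t)).toList
      = (a ++ "." ++ PySem.Str.join "." (b :: t)).toList := by
    rw [PySem.Str.toList_join]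
    simp only [List.map_cons]
    rw [PySem.Chars.join_cons_cons]
    simp [PySem.Str.toList_join]
  calc PySem.Str.join "." (a :: b :: t)
      = String.ofList (PySem.Str.join "." (a :: b :: t)).toList := by rw [String.ofList_toList]
    _ = _ := by rw [h, String.ofList_toList]

-- the optional accumulator, as the join of the list of labels already absorbed
def jopt : List String → Option String
  | [] => none
  | u => some (PySem.Str.join "." u)

theorem str_jopt (a : String) (u : List String) :
    (match jopt u with | none => a | some t => a ++ "." ++ t) = PySem.Str.join "." (a :: u) := by
  cases u with
  | nil => simp [jopt, strjoin_singleton]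
  | cons b t => simp [jopt, strjoin_cons]

-- the B-side right-to-left scan checks every nonempty suffix (of the reversed input)
theorem bLoop_eq (s : List String) :
    ∀ (l : List String) (u : List String),
      bLoop s l (jopt u)
        = specG (fun ps => s.contains (PySem.Str.join "." (ps ++ u))) l.reverse := by
  intro l
  induction l with
  | nil => intro u; simp [bLoop, specG]
  | cons a l' ih =>
    intro u
    show (if s.contains (match jopt u with | none => a | some t => a ++ "." ++ t) = true
          then true
          else bLoop s l' (some (match jopt u with | none => a | some t => a ++ "." ++ t))) = _
    rw [str_jopt a u]
    rw [show (some (PySem.Str.join "." (a :: u))) = jopt (a :: u) from rfl]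
    rw [show (a :: l').reverse = l'.reverse ++ [a] by simp]
    rw [specG_append_singleton]
    rw [ih (a :: u)]
    rw [specG_congr (q := fun ps => s.contains (PySem.Str.join "." (ps ++ a :: u)))
        (q' := fun ps => s.contains (PySem.Str.join "." ((ps ++ [a]) ++ u)))
        (by intro ps; simp) l'.reverse]
    simp only [List.singleton_append]
    cases hc : s.contains (PySem.Str.join "." (a :: u)) <;> simp

-- ===== VERDICT (by name: the statement is the Claim_ definition above) =====
theorem has_parent_domain_spec : Claim_equal_has_parent_domain := by
  intro domain domain_set _
  unfold Spec_has_parent_domain has_parent_domain has_parent_domain_alt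
  by_cases hg : domain = "" || domain_set = []
  · simp [hg]
  · simp only [hg, Bool.false_eq_true, if_false]
    cases hs : PySem.Str.split? domain "." with
    | none => rfl
    | some parts =>
      simp only []
      rw [show ((parts.length : Int)) = ((parts.length : Nat) : Int) from rfl, aLoop_eq_specG]
      rw [PySem.List.slice_from parts (by norm_num : (0:Int) ≤ 1)]
      rw [show ((1:Int)).toNat = 1 from rfl]
      cases parts with
      | nil => rfl
      | cons p t =>
        rw [show (p :: t).drop 1 = t from rfl]
        rw [show (none : Option String) = jopt [] from rfl, bLoop_eq, List.reverse_reverse]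
        exact (specG_congr (by intro ps; simp) t).symm
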